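-- pv_equiv track=rewrite | github.com/leisureea1/zhiwaizhushou | python/app/core/course.py | _format_weeks
-- ===== SOURCE A (Python) =====
-- from typing import Dict, List, Optional
--
-- def _format_weeks(weeks: List[int]) -> str:
--     """格式化周次显示"""
--     if not weeks:
--         return ""
--
--     ranges = []
--     start = end = weeks[0]
--
--     for w in weeks[1:]:
--         if w == end + 1:
--             end = w
--         else:
--             ranges.append(f"{start}-{end}周" if start != end else f"{start}周")
--             start = end = w
--     ranges.append(f"{start}-{end}周" if start != end else f"{start}周")
--
--     return ", ".join(ranges)
-- ===== SOURCE B (Python) =====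
-- from typing import Dict, List, Optional
--
-- def _format_weeks(weeks: List[int]) -> str:
--     """Boundary-mask approach: find break points via adjacent pairs, zip starts with ends."""
--     if not weeks:
--         return ""
--     breaks = [(p, w) for p, w in zip(weeks, weeks[1:]) if w != p + 1]
--     starts = [weeks[0]] + [w for _, w in breaks]
--     ends = [p for p, _ in breaks] + [weeks[-1]]
--     return ", ".join(f"{s}周" if s == e else f"{s}-{e}周" for s, e in zip(starts, ends))
-- ===== Notes on version B (the rewrite author's own statement) =====
-- stated objective: alternative
-- what changed: B never tracks a current run at all: it detects the break points by filtering the zip of adjacent pairs (w != p+1), derives the run starts and ends as two separate lists from those break points, zips them into (start, end) pairs and formats each, whereas A walks the list once mutating start/end state and emitting strings at each boundary.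
import Mathlib
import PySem

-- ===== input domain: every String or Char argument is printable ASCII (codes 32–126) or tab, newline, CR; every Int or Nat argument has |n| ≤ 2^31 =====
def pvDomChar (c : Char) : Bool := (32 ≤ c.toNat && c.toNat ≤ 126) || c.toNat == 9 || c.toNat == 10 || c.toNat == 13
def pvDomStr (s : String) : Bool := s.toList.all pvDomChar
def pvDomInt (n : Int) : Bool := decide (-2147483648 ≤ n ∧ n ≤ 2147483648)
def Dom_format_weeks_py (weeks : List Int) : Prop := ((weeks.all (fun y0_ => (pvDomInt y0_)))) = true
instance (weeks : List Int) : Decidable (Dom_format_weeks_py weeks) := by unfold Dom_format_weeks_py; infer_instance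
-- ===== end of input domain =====

-- B detects run boundaries by filtering adjacent pairs and zips the resulting start/end
-- lists, instead of A's single stateful loop (objective: alternative decomposition, same cost).

-- ===== PORT A =====
-- the two f-string branches of A, in A's branch order (start != end ? range : single)
def fmtA (s e : Int) : String :=
  if s ≠ e then PySem.Int.toStr s ++ "-" ++ PySem.Int.toStr e ++ "周"
  else PySem.Int.toStr s ++ "周"

-- the 'for w in weeks[1:]' loop with state (ranges, start, end); the trailing
-- 'ranges.append(...)' after the loop is the base case
def loopA (ranges : List String) (s e : Int) : List Int → List String
  | [] => ranges ++ [fmtA s e]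
  | w :: ws =>
      if w = e + 1 then loopA ranges s w ws
      else loopA (ranges ++ [fmtA s e]) w w ws

def format_weeks_py (weeks : List Int) : String :=
  match weeks with
  | [] => ""
  | w0 :: rest => PySem.Str.join ", " (loopA [] w0 w0 rest)

-- ===== PORT B =====
-- B's conditional expression, in B's branch order (s == e ? single : range)
def fmtB (r : Int × Int) : String :=
  if r.1 = r.2 then PySem.Int.toStr r.1 ++ "周"
  else PySem.Int.toStr r.1 ++ "-" ++ PySem.Int.toStr r.2 ++ "周"

def format_weeks_py_alt (weeks : List Int) : String :=
  match weeks with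
  | [] => ""
  | w0 :: rest =>
      let breaks := ((w0 :: rest).zip rest).filter (fun p => p.2 ≠ p.1 + 1)
      let starts := w0 :: breaks.map Prod.snd
      let ends := breaks.map Prod.fst ++ [rest.getLastD w0]   -- weeks[-1]
      PySem.Str.join ", " ((starts.zip ends).map fmtB)

-- ===== PRECONDITION & SPEC =====
def Spec_format_weeks_py (weeks : List Int) (out : String) : Prop := out = format_weeks_py_alt weeks
instance (weeks : List Int) (out : String) : Decidable (Spec_format_weeks_py weeks out) := by unfold Spec_format_weeks_py; infer_instance

-- ===== CLAIM (what is proved, stated in full; the proofs are below) =====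
def Claim_equal_format_weeks_py : Prop := ∀ (weeks : List Int), Dom_format_weeks_py weeks → Spec_format_weeks_py weeks (format_weeks_py weeks)

-- ===== LEMMAS AND PROOFS =====

-- canonical list of (start, end) runs, used only by the proofs
def runsOf (s e : Int) : List Int → List (Int × Int)
  | [] => [(s, e)]
  | w :: ws => if w = e + 1 then runsOf s w ws else (s, e) :: runsOf w w ws

theorem fmtA_eq_fmtB (s e : Int) : fmtA s e = fmtB (s, e) := by
  by_cases h : s = e <;> simp [fmtA, fmtB, h]

theorem loopA_acc (ws : List Int) (ranges : List String) (s e : Int) :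
    loopA ranges s e ws = ranges ++ loopA [] s e ws := by
  induction ws generalizing ranges s e with
  | nil => simp only [loopA, List.nil_append]
  | cons w ws ih =>
      by_cases h : w = e + 1
      · simp only [loopA, if_pos h]; exact ih ranges s w
      · simp only [loopA, if_neg h, List.nil_append]
        rw [ih (ranges ++ [fmtA s e]), ih [fmtA s e]]; simp

theorem loopA_runs (ws : List Int) (s e : Int) :
    loopA [] s e ws = (runsOf s e ws).map fmtB := by
  induction ws generalizing s e with
  | nil => simp [loopA, runsOf, fmtA_eq_fmtB]
  | cons w ws ih =>
      by_cases h : w = e + 1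
      · simp only [loopA, runsOf, if_pos h]; exact ih s w
      · simp only [loopA, runsOf, if_neg h, List.nil_append, List.map_cons]
        rw [loopA_acc ws [fmtA s e] w w, ih w w]; simp [fmtA_eq_fmtB]

theorem starts_runs (ws : List Int) (s e : Int) :
    s :: (((e :: ws).zip ws).filter (fun p => p.2 ≠ p.1 + 1)).map Prod.snd
      = (runsOf s e ws).map Prod.fst := by
  induction ws generalizing s e with
  | nil => simp [runsOf]
  | cons w ws ih =>
      by_cases h : w = e + 1
      · simp only [List.zip_cons_cons, List.filter_cons, runsOf, if_pos h]
        rw [if_neg (by simp [h])]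
        exact ih s w
      · simp only [List.zip_cons_cons, List.filter_cons, runsOf, if_neg h]
        rw [if_pos (by simpa using h)]
        simp only [List.map_cons, List.map_cons]
        rw [← ih w w]

theorem ends_runs (ws : List Int) (s e : Int) :
    (((e :: ws).zip ws).filter (fun p => p.2 ≠ p.1 + 1)).map Prod.fst ++ [ws.getLastD e]
      = (runsOf s e ws).map Prod.snd := by
  induction ws generalizing s e with
  | nil => simp [runsOf]
  | cons w ws ih =>
      have hlast : (w :: ws).getLastD e = ws.getLastD w := by
        cases ws <;> simp [List.getLastD]
      by_cases h : w = e + 1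
      · simp only [List.zip_cons_cons, List.filter_cons, runsOf, if_pos h, hlast]
        rw [if_neg (by simp [h])]
        exact ih s w
      · simp only [List.zip_cons_cons, List.filter_cons, runsOf, if_neg h, hlast]
        rw [if_pos (by simpa using h)]
        simp only [List.map_cons, List.cons_append]
        rw [ih w w]

theorem alt_runs (w0 : Int) (rest : List Int) :
    format_weeks_py_alt (w0 :: rest) = PySem.Str.join ", " ((runsOf w0 w0 rest).map fmtB) := by
  simp only [format_weeks_py_alt]
  rw [show (w0 :: ((((w0 :: rest).zip rest).filter (fun p => p.2 ≠ p.1 + 1)).map Prod.snd))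
        = (runsOf w0 w0 rest).map Prod.fst from starts_runs rest w0 w0,
      show ((((w0 :: rest).zip rest).filter (fun p => p.2 ≠ p.1 + 1)).map Prod.fst ++ [rest.getLastD w0])
        = (runsOf w0 w0 rest).map Prod.snd from ends_runs rest w0 w0,
      List.zip_map', List.map_map]
  simp [Function.comp_def]

-- ===== VERDICT (by name: the statement is the Claim_ definition above) =====
theorem format_weeks_py_spec : Claim_equal_format_weeks_py := by
  intro weeks _
  unfold Spec_format_weeks_py
  match weeks with
  | [] => rfl
  | w0 :: rest =>
      rw [alt_runs]
      simp only [format_weeks_py]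
      rw [loopA_runs]
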